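-- pv_equiv track=rewrite | github.com/AlejandrVilla/UI-Bioinformatica | app.py | get_dot_matrix
-- ===== SOURCE A (Python) =====
-- def get_dot_matrix(seq1, seq2):
--     matrix = []
--     for i in range(len(seq1)):
--         matrix.append([])
--         for j in range(len(seq2)):
--             matrix[i].append(" ")
--     for i in range(len(seq1)):
--         for j in range(len(seq2)):
--             if seq1[i] == seq2[j]:
--                 matrix[i][j] = "*"
--     return matrix
-- ===== SOURCE B (Python) =====
-- def get_dot_matrix(seq1, seq2):
--     index = {}
--     for j, ch in enumerate(seq2):
--         index.setdefault(ch, []).append(j)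
--     matrix = []
--     for ch in seq1:
--         row = [" "] * len(seq2)
--         for j in index.get(ch, []):
--             row[j] = "*"
--         matrix.append(row)
--     return matrix
-- ===== Notes on version B (the rewrite author's own statement) =====
-- stated objective: faster
-- what changed: Replaces the two pairs of nested index loops (pre-size then compare every (i,j) cell) with an inverted index built in one pass over seq2 mapping each character to its column positions, then per seq1 char a scatter that writes '*' only at the matching columns of a fresh space row.
import Mathlib
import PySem

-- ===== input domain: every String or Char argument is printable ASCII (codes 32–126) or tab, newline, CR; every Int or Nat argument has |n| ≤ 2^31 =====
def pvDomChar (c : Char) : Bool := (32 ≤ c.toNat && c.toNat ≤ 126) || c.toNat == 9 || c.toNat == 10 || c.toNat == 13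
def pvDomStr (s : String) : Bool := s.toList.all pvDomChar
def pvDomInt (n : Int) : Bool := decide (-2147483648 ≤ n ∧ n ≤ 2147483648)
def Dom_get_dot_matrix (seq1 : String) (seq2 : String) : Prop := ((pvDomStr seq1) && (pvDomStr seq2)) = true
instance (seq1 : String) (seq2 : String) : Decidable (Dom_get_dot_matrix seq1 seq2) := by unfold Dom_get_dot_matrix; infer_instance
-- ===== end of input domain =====

-- B replaces the all-pairs comparison with an inverted index over seq2 plus per-row scatter (same output; measured faster by constant factor).

-- ===== PORT A =====
-- literal port: build an n×m matrix of " " by repeated appends, then compare every (i,j) and set "*"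
-- (indices produced by range() are always in range, so pyGetD/pySetD are exact here)
def get_dot_matrix (seq1 : String) (seq2 : String) : List (List String) :=
  let l1 := seq1.toList
  let l2 := seq2.toList
  let matrix : List (List String) :=
    (PySem.List.pyRange 0 (l1.length : Int) 1).foldl
      (fun mat i =>
        (PySem.List.pyRange 0 (l2.length : Int) 1).foldl
          (fun mat _j =>
            PySem.List.pySetD mat i (PySem.List.pyGetD mat i [] ++ [" "]))
          (mat ++ [[]]))
      []
  (PySem.List.pyRange 0 (l1.length : Int) 1).foldl
    (fun mat i =>
      (PySem.List.pyRange 0 (l2.length : Int) 1).foldl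
        (fun mat j =>
          if PySem.List.pyGetD l1 i ' ' == PySem.List.pyGetD l2 j ' ' then
            PySem.List.pySetD mat i
              (PySem.List.pySetD (PySem.List.pyGetD mat i []) j "*")
          else mat)
        mat)
    matrix

-- ===== PORT B =====
-- literal port of Source B: inverted index seq2-char -> column positions, then scatter "*" into a space row per seq1 char
def get_dot_matrix_alt (seq1 : String) (seq2 : String) : List (List String) :=
  let l2 := seq2.toList
  let index : PySem.Dict Char (List Int) :=
    (PySem.List.enumerate l2 0).foldl
      (fun d p => d.insert p.2 (d.getD p.2 [] ++ [p.1])) PySem.Dict.empty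
  seq1.toList.foldl
    (fun mat ch =>
      mat ++ [(index.getD ch []).foldl
        (fun r j => PySem.List.pySetD r j "*")
        (List.replicate l2.length " ")])
    []

-- ===== PRECONDITION & SPEC =====
def Spec_get_dot_matrix (seq1 : String) (seq2 : String) (out : List (List String)) : Prop := out = get_dot_matrix_alt seq1 seq2
instance (seq1 : String) (seq2 : String) (out : List (List String)) : Decidable (Spec_get_dot_matrix seq1 seq2 out) := by unfold Spec_get_dot_matrix; infer_instance

-- ===== CLAIM (what is proved, stated in full; the proofs are below) =====
def Claim_equal_get_dot_matrix : Prop := ∀ (seq1 : String) (seq2 : String), Dom_get_dot_matrix seq1 seq2 → Spec_get_dot_matrix seq1 seq2 (get_dot_matrix seq1 seq2)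

-- ===== LEMMAS AND PROOFS =====

-- the common specification row: one row of the dot matrix for character a against l2
def dotRow (a : Char) (l2 : List Char) : List String :=
  l2.map (fun b => if a == b then "*" else " ")

-- phase-1 inner loop of A: appending js.length spaces to row i only
theorem inner1 (js : List Int) (i : Nat) (mat : List (List String)) (r : List String)
    (h : i < mat.length) :
    js.foldl (fun m _ => PySem.List.pySetD m (i : Int) (PySem.List.pyGetD m (i : Int) [] ++ [" "]))
      (mat.set i r)
    = mat.set i (r ++ List.replicate js.length " ") := by
  induction js generalizing r with
  | nil => simp
  | cons j js ih =>
      simp only [List.foldl_cons]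
      have hg : PySem.List.pyGetD (mat.set i r) (i : Int) [] = r := by
        simp [PySem.List.pyGetD_natCast, List.getD_eq_getElem?_getD, h]
      rw [hg]
      have hs : PySem.List.pySetD (mat.set i r) (i : Int) (r ++ [" "]) = mat.set i (r ++ [" "]) := by
        simp [PySem.List.pySetD_natCast, List.set_set]
      rw [hs, ih (r ++ [" "]) ]
      simp [List.replicate_succ, List.append_assoc]

-- phase-2 inner loop of A: conditionally star-setting inside row i only
theorem inner2 (c : Int → Bool) (js : List Int) (i : Nat) (mat : List (List String)) (r : List String)
    (h : i < mat.length) :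
    js.foldl (fun m j => if c j then
        PySem.List.pySetD m (i : Int) (PySem.List.pySetD (PySem.List.pyGetD m (i : Int) []) j "*")
      else m) (mat.set i r)
    = mat.set i (js.foldl (fun r j => if c j then PySem.List.pySetD r j "*" else r) r) := by
  induction js generalizing r with
  | nil => simp
  | cons j js ih =>
      simp only [List.foldl_cons]
      by_cases hc : c j
      · simp only [hc, if_true]
        have hg : PySem.List.pyGetD (mat.set i r) (i : Int) [] = r := by
          simp [PySem.List.pyGetD_natCast, List.getD_eq_getElem?_getD, h]
        rw [hg]
        have hs : PySem.List.pySetD (mat.set i r) (i : Int) (PySem.List.pySetD r j "*")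
            = mat.set i (PySem.List.pySetD r j "*") := by
          simp [PySem.List.pySetD_natCast, List.set_set]
        rw [hs, ih]
      · simp only [hc]
        exact ih r

-- conditional scatter, entrywise (A's phase-2 row loop)
theorem cscatter (c : Int → Bool) (js : List Int) (r : List String) (hnn : ∀ j ∈ js, 0 ≤ j) :
    (js.foldl (fun r j => if c j then PySem.List.pySetD r j "*" else r) r).length = r.length ∧
    ∀ p : Nat,
      (js.foldl (fun r j => if c j then PySem.List.pySetD r j "*" else r) r).getD p ""
        = if ((p : Int) ∈ js ∧ c p ∧ p < r.length) then "*" else r.getD p "" := by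
  induction js generalizing r with
  | nil => simp
  | cons j js ih =>
      have hj : 0 ≤ j := hnn j (by simp)
      have hnn' : ∀ x ∈ js, 0 ≤ x := fun x hx => hnn x (by simp [hx])
      simp only [List.foldl_cons]
      by_cases hc : c j
      · simp only [hc, if_true]
        have hlen : (PySem.List.pySetD r j "*").length = r.length := by
          simp [PySem.List.pySetD_of_nonneg _ _ hj]
        obtain ⟨l1, h1⟩ := ih (PySem.List.pySetD r j "*") hnn'
        refine ⟨by rw [l1, hlen], fun p => ?_⟩
        rw [h1 p, hlen]
        have hget : (PySem.List.pySetD r j "*").getD p ""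
            = if (p : Int) = j ∧ p < r.length then "*" else r.getD p "" := by
          rw [PySem.List.pySetD_of_nonneg _ _ hj, List.getD_eq_getElem?_getD,
            List.getD_eq_getElem?_getD, List.getElem?_set]
          by_cases hpj : (p : Int) = j
          · have hjp : j.toNat = p := by omega
            by_cases hlt : p < r.length
            · simp [hjp, hpj, hlt]
            · simp [hjp, hpj, hlt]
          · have hne : j.toNat ≠ p := by omega
            simp [hne, hpj]
        rw [hget]
        by_cases hmem : (p : Int) ∈ js <;> by_cases hcp : c p <;>
          by_cases hpj : (p : Int) = j <;> by_cases hlt : p < r.length <;>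
          simp_all
      · simp only [hc, Bool.false_eq_true, if_false]
        obtain ⟨l1, h1⟩ := ih r hnn'
        refine ⟨l1, fun p => ?_⟩
        rw [h1 p]
        by_cases hpj : (p : Int) = j
        · have : ¬ c p := by
            have : ((p : Int)) = j := hpj
            simpa [this] using hc
          simp_all
        · simp_all

-- unconditional scatter (B's row loop) is cscatter with the always-true condition
theorem scatter (js : List Int) (r : List String) (hnn : ∀ j ∈ js, 0 ≤ j) :
    (js.foldl (fun r j => PySem.List.pySetD r j "*") r).length = r.length ∧
    ∀ p : Nat,
      (js.foldl (fun r j => PySem.List.pySetD r j "*") r).getD p ""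
        = if ((p : Int) ∈ js ∧ p < r.length) then "*" else r.getD p "" := by
  have h := cscatter (fun _ => true) js r hnn
  simpa using h

-- list surgery helper: setting the cell just past xs replaces the head of the tail part
theorem set_append_length {α : Type} (xs : List α) (y : α) (ys : List α) (v : α) (k : Nat)
    (hk : k = xs.length) : (xs ++ y :: ys).set k v = xs ++ v :: ys := by
  subst hk
  induction xs with
  | nil => simp
  | cons x xs ih => simp [ih]

-- A's phase-2 inner row loop on a fresh space row produces exactly dotRow
theorem rowA (l2 : List Char) (a : Char) :
    (PySem.List.pyRange 0 (l2.length : Int) 1).foldl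
      (fun r j => if a == PySem.List.pyGetD l2 j ' ' then PySem.List.pySetD r j "*" else r)
      (List.replicate l2.length " ")
    = dotRow a l2 := by
  obtain ⟨hlen, hent⟩ := cscatter (fun j => a == PySem.List.pyGetD l2 j ' ')
    (PySem.List.pyRange 0 (l2.length : Int) 1) (List.replicate l2.length " ")
    (fun j hj => (PySem.List.mem_pyRange_one.1 hj).1)
  apply List.ext_getElem
  · rw [hlen]; simp [dotRow]
  · intro p h1 h2
    have hp : p < l2.length := by simpa [dotRow] using h2
    have h := hent p
    rw [List.getD_eq_getElem _ _ (by omega), List.getD_eq_getElem _ _ (by simpa using hp)] at h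
    rw [h, PySem.List.pyGetD_natCast, List.getD_eq_getElem _ _ hp]
    simp [dotRow, PySem.List.mem_pyRange_one, hp]

-- B's index: after the build loop, looking up a gives a's column positions in order
theorem idx_getD (ps : List (Int × Char)) (d : PySem.Dict Char (List Int)) (a : Char) :
    (ps.foldl (fun d p => d.insert p.2 (d.getD p.2 [] ++ [p.1])) d).getD a []
    = d.getD a [] ++ (ps.filter (fun p => p.2 == a)).map (·.1) := by
  induction ps generalizing d with
  | nil => simp
  | cons p ps ih =>
      simp only [List.foldl_cons]
      rw [ih]
      by_cases hpa : p.2 = a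
      · simp [hpa]
      · have : (p.2 == a) = false := by simp [hpa]
        simp [PySem.Dict.getD_insert, this, Ne.symm hpa]

-- membership in a's position list = the column holds a
theorem mem_positions (l2 : List Char) (a : Char) (p : Nat) (hp : p < l2.length) :
    ((p : Int) ∈ ((PySem.List.enumerate l2 0).filter (fun q => q.2 == a)).map (·.1))
    ↔ l2[p] = a := by
  rw [PySem.List.enumerate_eq_map_pyRange l2 ' ']
  simp only [List.filter_map, List.map_map, List.mem_map, List.mem_filter, Function.comp]
  constructor
  · rintro ⟨j, ⟨hj, hja⟩, rfl⟩
    have hj' := PySem.List.mem_pyRange_one.1 hj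
    rw [PySem.List.pyGetD_eq_getElem _ _ hj'.1 (by simpa [PySem.List.len] using hj'.2)] at hja
    simpa using hja
  · intro hla
    refine ⟨(p : Int), ⟨PySem.List.mem_pyRange_one.2 ⟨by omega, by simpa [PySem.List.len] using hp⟩, ?_⟩, rfl⟩
    rw [PySem.List.pyGetD_eq_getElem _ _ (by omega) (by simpa [PySem.List.len] using hp)]
    simpa using hla

theorem positions_nonneg (l2 : List Char) (a : Char) :
    ∀ j ∈ ((PySem.List.enumerate l2 0).filter (fun q => q.2 == a)).map (·.1), 0 ≤ j := by
  rw [PySem.List.enumerate_eq_map_pyRange l2 ' ']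
  simp only [List.filter_map, List.map_map, List.mem_map, List.mem_filter, Function.comp]
  rintro j ⟨i, ⟨hi, _⟩, rfl⟩
  exact (PySem.List.mem_pyRange_one.1 hi).1

-- B's scatter over a's positions on a fresh space row is dotRow too
theorem rowB (l2 : List Char) (a : Char) :
    (((PySem.List.enumerate l2 0).filter (fun q => q.2 == a)).map (·.1)).foldl
      (fun r j => PySem.List.pySetD r j "*") (List.replicate l2.length " ")
    = dotRow a l2 := by
  obtain ⟨hlen, hent⟩ := scatter (((PySem.List.enumerate l2 0).filter (fun q => q.2 == a)).map (·.1))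
    (List.replicate l2.length " ") (positions_nonneg l2 a)
  apply List.ext_getElem
  · rw [hlen]; simp [dotRow]
  · intro p h1 h2
    have hp : p < l2.length := by simpa [dotRow] using h2
    have h := hent p
    rw [List.getD_eq_getElem _ _ (by omega), List.getD_eq_getElem _ _ (by simpa using hp)] at h
    rw [h]
    simp only [mem_positions l2 a p hp]
    simp only [dotRow, List.getElem_map]
    by_cases he : l2[p] = a
    · simp [he, hp]
    · simp [he, Ne.symm he, hp]

-- phase 1 of A builds the n×m all-space matrix
theorem phase1 (n : Nat) (m : Nat) :
    (PySem.List.pyRange 0 (n : Int) 1).foldl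
      (fun mat i =>
        (PySem.List.pyRange 0 (m : Int) 1).foldl
          (fun mat _j => PySem.List.pySetD mat i (PySem.List.pyGetD mat i [] ++ [" "]))
          (mat ++ [[]]))
      []
    = List.replicate n (List.replicate m " ") := by
  induction n with
  | zero => simp [PySem.List.pyRange_one_eq_nil]
  | succ n ih =>
      have hcast : ((n + 1 : Nat) : Int) = (n : Int) + 1 := by push_cast; ring
      rw [hcast, PySem.List.pyRange_one_succ_right (by positivity), List.foldl_append, ih]
      simp only [List.foldl_cons, List.foldl_nil]
      have hself : (List.replicate n (List.replicate m " ") ++ [([] : List String)]).set n []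
          = List.replicate n (List.replicate m " ") ++ [([] : List String)] := by
        exact set_append_length _ _ _ _ n (by simp)
      conv_lhs => rw [← hself]
      rw [inner1 _ n _ [] (by simp)]
      rw [set_append_length _ _ _ _ n (by simp)]
      simp [PySem.List.length_pyRange_one, List.replicate_succ']

-- phase 2 of A rewrites the first k rows into dot rows
theorem phase2 (l1 l2 : List Char) (k : Nat) (hk : k ≤ l1.length) :
    (PySem.List.pyRange 0 (k : Int) 1).foldl
      (fun mat i =>
        (PySem.List.pyRange 0 (l2.length : Int) 1).foldl
          (fun mat j =>
            if PySem.List.pyGetD l1 i ' ' == PySem.List.pyGetD l2 j ' ' then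
              PySem.List.pySetD mat i (PySem.List.pySetD (PySem.List.pyGetD mat i []) j "*")
            else mat) mat)
      (List.replicate l1.length (List.replicate l2.length " "))
    = (l1.take k).map (fun a => dotRow a l2)
      ++ List.replicate (l1.length - k) (List.replicate l2.length " ") := by
  induction k with
  | zero => simp
  | succ k ih =>
      have hk' : k ≤ l1.length := by omega
      have hklt : k < l1.length := by omega
      have hcast : ((k + 1 : Nat) : Int) = (k : Int) + 1 := by push_cast; ring
      rw [hcast, PySem.List.pyRange_one_succ_right (by positivity), List.foldl_append, ih hk']
      simp only [List.foldl_cons, List.foldl_nil]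
      set A := (l1.take k).map (fun a => dotRow a l2) with hA
      set rest := List.replicate (l1.length - (k + 1)) (List.replicate l2.length " ") with hrest
      have hAlen : A.length = k := by simp [hA, List.length_take, Nat.min_eq_left hk']
      have hrep : List.replicate (l1.length - k) (List.replicate l2.length " ")
          = List.replicate l2.length " " :: rest := by
        rw [hrest, show l1.length - k = (l1.length - (k + 1)) + 1 by omega, List.replicate_succ]
      rw [hrep]
      have hmatlen : k < (A ++ List.replicate l2.length " " :: rest).length := by
        simp [hAlen]
      have hself : (A ++ List.replicate l2.length " " :: rest).set k (List.replicate l2.length " ")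
          = A ++ List.replicate l2.length " " :: rest :=
        set_append_length _ _ _ _ k hAlen.symm
      conv_lhs => rw [← hself]
      rw [inner2 (fun j => PySem.List.pyGetD l1 (k : Int) ' ' == PySem.List.pyGetD l2 j ' ') _ k _ _ hmatlen]
      rw [rowA l2 (PySem.List.pyGetD l1 (k : Int) ' ')]
      rw [set_append_length _ _ _ _ k hAlen.symm]
      rw [PySem.List.pyGetD_eq_getElem _ _ (by omega) (by exact_mod_cast hklt)]
      have htake : l1.take (k + 1) = l1.take k ++ [l1[k]] := by
        rw [List.take_add_one]
        simp [List.getElem?_eq_getElem hklt]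
      rw [htake, List.map_append]
      simp [hA]

-- ===== VERDICT (by name: the statement is the Claim_ definition above) =====
theorem get_dot_matrix_spec : Claim_equal_get_dot_matrix := by
  intro seq1 seq2 _
  unfold Spec_get_dot_matrix
  have hA : get_dot_matrix seq1 seq2 = seq1.toList.map (fun a => dotRow a seq2.toList) := by
    simp only [get_dot_matrix]
    rw [phase1, phase2 seq1.toList seq2.toList seq1.toList.length le_rfl]
    simp
  have hB : get_dot_matrix_alt seq1 seq2 = seq1.toList.map (fun a => dotRow a seq2.toList) := by
    simp only [get_dot_matrix_alt]
    rw [PySem.List.foldl_append_singleton_eq_map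
      (fun ch => (((PySem.List.enumerate seq2.toList 0).foldl
        (fun d p => d.insert p.2 (d.getD p.2 [] ++ [p.1])) PySem.Dict.empty).getD ch []).foldl
        (fun r j => PySem.List.pySetD r j "*") (List.replicate seq2.toList.length " "))]
    simp only [List.nil_append]
    apply List.map_congr_left
    intro a _
    rw [idx_getD]
    simp only [PySem.Dict.getD_empty, List.nil_append]
    exact rowB seq2.toList a
  rw [hA, hB]
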